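-- pv_equiv track=rewrite | github.com/BenBrooke450/Whiteboard | To Review.py | loop
-- ===== SOURCE A (Python) =====
-- def loop(rings: str):
--
--     list_rings = list([y,x] for x,y in zip(rings[::2],rings[1::2]))
--     dict1 = dict()
--
--     for x in list_rings:
--         if x[0] not in dict1.keys():
--             dict1[x[0]] = x[1]
--         else:
--             dict1[x[0]] = x[1] + dict1.get(x[0])
--
--     return sum(1 for x,y in dict1.items() if "R" in y and "G" in y and "B" in y)
-- ===== SOURCE B (Python) =====
-- def loop(rings: str):
--     rods_r, rods_g, rods_b = set(), set(), set()
--     for color, rod in zip(rings[::2], rings[1::2]):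
--         if color == 'R':
--             rods_r.add(rod)
--         elif color == 'G':
--             rods_g.add(rod)
--         elif color == 'B':
--             rods_b.add(rod)
--     return len(rods_r & rods_g & rods_b)
-- ===== Notes on version B (the rewrite author's own statement) =====
-- stated objective: faster
-- what changed: Instead of grouping colors into a rod-keyed dict of growing color strings and then scanning each string for all three color letters, B keeps one set of rods per color in a single pass and returns the size of the three-way set intersection.
import Mathlib
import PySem

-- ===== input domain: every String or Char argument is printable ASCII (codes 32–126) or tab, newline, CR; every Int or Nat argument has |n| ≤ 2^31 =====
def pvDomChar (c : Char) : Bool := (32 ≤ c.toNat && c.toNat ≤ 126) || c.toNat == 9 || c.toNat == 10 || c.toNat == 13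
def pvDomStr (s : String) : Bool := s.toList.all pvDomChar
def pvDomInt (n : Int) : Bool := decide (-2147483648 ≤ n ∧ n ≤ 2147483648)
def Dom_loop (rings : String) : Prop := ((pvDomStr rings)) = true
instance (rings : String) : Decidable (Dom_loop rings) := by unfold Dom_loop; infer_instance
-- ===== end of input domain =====

-- B keeps one set of rods per color in a single pass and returns the size of the
-- three-way set intersection, instead of A's rod-keyed dict of color strings
-- scanned for all three letters (objective: alternative decomposition).

-- zip(rings[::2], rings[1::2]) — the (color, rod) pairs; both Pythons compute exactly this
def pvPairs (rings : String) : List (Char × Char) :=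
  ((PySem.List.slice? rings.toList none none 2).getD []).zip
    ((PySem.List.slice? rings.toList (some 1) none 2).getD [])

-- ===== PORT A =====
-- the loop body: x = [rod, color]; strings are carried as List Char ("y + z" = ++, "R" in y = 'R' ∈ y via contains)
def loopStep (d : PySem.Dict Char (List Char)) (x : Char × Char) : PySem.Dict Char (List Char) :=
  if d.contains x.1 = false then d.insert x.1 [x.2]
  else d.insert x.1 ([x.2] ++ d.getD x.1 [])

def loop (rings : String) : Int :=
  let listRings := (pvPairs rings).map (fun p => (p.2, p.1))
  let d := listRings.foldl loopStep PySem.Dict.empty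
  ((d.items.filter (fun p => p.2.contains 'R' && p.2.contains 'G' && p.2.contains 'B')).length : Int)

-- ===== PORT B =====
def altStep (s : PySem.Set Char × PySem.Set Char × PySem.Set Char) (p : Char × Char) :
    PySem.Set Char × PySem.Set Char × PySem.Set Char :=
  if p.1 = 'R' then (s.1.add p.2, s.2.1, s.2.2)
  else if p.1 = 'G' then (s.1, s.2.1.add p.2, s.2.2)
  else if p.1 = 'B' then (s.1, s.2.1, s.2.2.add p.2)
  else s

def loop_alt (rings : String) : Int :=
  let s := (pvPairs rings).foldl altStep (PySem.Set.empty, PySem.Set.empty, PySem.Set.empty)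
  PySem.Set.len (PySem.Set.inter (PySem.Set.inter s.1 s.2.1) s.2.2)

-- ===== PRECONDITION & SPEC =====
def Spec_loop (rings : String) (out : Int) : Prop := out = loop_alt rings
instance (rings : String) (out : Int) : Decidable (Spec_loop rings out) := by unfold Spec_loop; infer_instance

-- ===== CLAIM (what is proved, stated in full; the proofs are below) =====
def Claim_equal_loop : Prop := ∀ (rings : String), Dom_loop rings → Spec_loop rings (loop rings)

-- ===== LEMMAS AND PROOFS =====

-- invariant tying A's dict to B's three sets after processing the same pairs
def pvInv (d : PySem.Dict Char (List Char)) (s : PySem.Set Char × PySem.Set Char × PySem.Set Char) : Prop :=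
  d.keys.Nodup ∧ s.1.Nodup ∧ s.2.1.Nodup ∧ s.2.2.Nodup ∧
  (∀ r, r ∈ s.1 ↔ 'R' ∈ d.getD r []) ∧
  (∀ r, r ∈ s.2.1 ↔ 'G' ∈ d.getD r []) ∧
  (∀ r, r ∈ s.2.2 ↔ 'B' ∈ d.getD r [])

lemma mem_step_getD (d : PySem.Dict Char (List Char)) (p : Char × Char) (c r : Char) :
    c ∈ (loopStep d p).getD r [] ↔ (r = p.1 ∧ c = p.2) ∨ c ∈ d.getD r [] := by
  unfold loopStep
  split
  · rename_i hc
    rw [PySem.Dict.getD_insert]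
    by_cases hr : r = p.1
    · subst hr
      rw [PySem.Dict.getD_of_not_contains d [] hc]
      simp
    · simp [hr]
  · rw [PySem.Dict.getD_insert]
    by_cases hr : r = p.1 <;> simp [hr]

lemma inv_step (d : PySem.Dict Char (List Char)) (s : PySem.Set Char × PySem.Set Char × PySem.Set Char)
    (p : Char × Char) (h : pvInv d s) : pvInv (loopStep d (p.2, p.1)) (altStep s p) := by
  obtain ⟨hk, h1, h2, h3, hR, hG, hB⟩ := h
  have hk' : (loopStep d (p.2, p.1)).keys.Nodup := by
    unfold loopStep; split <;> exact PySem.Dict.nodup_keys_insert _ _ _ hk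
  have key : ∀ (col : Char) (old : PySem.Set Char),
      (∀ r, r ∈ old ↔ col ∈ d.getD r []) →
      ∀ r, r ∈ (if p.1 = col then old.add p.2 else old) ↔ col ∈ (loopStep d (p.2, p.1)).getD r [] := by
    intro col old hold r
    rw [mem_step_getD]
    by_cases hcol : p.1 = col
    · subst hcol
      rw [if_pos rfl, PySem.Set.mem_add, hold]
      constructor
      · rintro (h | h)
        · right; exact h
        · left; exact ⟨h, rfl⟩
      · rintro (⟨h, _⟩ | h)
        · right; exact h
        · left; exact h
    · rw [if_neg hcol, hold]
      constructor
      · intro h; right; exact h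
      · rintro (⟨_, hc⟩ | h)
        · exact absurd hc.symm hcol
        · exact h
  refine ⟨hk', ?_, ?_, ?_, ?_, ?_, ?_⟩
  · unfold altStep; split <;> [exact PySem.Set.nodup_add _ _ h1; (split <;> [exact h1; (split <;> [exact h1; exact h1])])]
  · unfold altStep; split <;> [exact h2; (split <;> [exact PySem.Set.nodup_add _ _ h2; (split <;> [exact h2; exact h2])])]
  · unfold altStep; split <;> [exact h3; (split <;> [exact h3; (split <;> [exact PySem.Set.nodup_add _ _ h3; exact h3])])]
  · intro r
    have := key 'R' s.1 hR r
    unfold altStep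
    by_cases hp : p.1 = 'R'
    · simpa [hp] using this
    · by_cases hg : p.1 = 'G' <;> by_cases hb : p.1 = 'B' <;> simp_all
  · intro r
    have := key 'G' s.2.1 hG r
    unfold altStep
    by_cases hp : p.1 = 'G'
    · simp only [if_pos hp] at this
      by_cases hr : p.1 = 'R'
      · rw [hp] at hr; exact absurd hr.symm (by decide)
      · simpa [hr, hp] using this
    · by_cases hr : p.1 = 'R' <;> by_cases hb : p.1 = 'B' <;> simp_all
  · intro r
    have := key 'B' s.2.2 hB r
    unfold altStep
    by_cases hp : p.1 = 'B'
    · simp only [if_pos hp] at this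
      by_cases hr : p.1 = 'R'
      · rw [hp] at hr; exact absurd hr.symm (by decide)
      · by_cases hg : p.1 = 'G'
        · rw [hp] at hg; exact absurd hg.symm (by decide)
        · simpa [hr, hg, hp] using this
    · by_cases hr : p.1 = 'R' <;> by_cases hg : p.1 = 'G' <;> simp_all

lemma inv_fold (l : List (Char × Char)) (d : PySem.Dict Char (List Char))
    (s : PySem.Set Char × PySem.Set Char × PySem.Set Char) (h : pvInv d s) :
    pvInv (l.foldl (fun d p => loopStep d (p.2, p.1)) d) (l.foldl altStep s) := by
  induction l generalizing d s with
  | nil => exact h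
  | cons p t ih => exact ih _ _ (inv_step d s p h)

lemma mem_getD_mem_keys (d : PySem.Dict Char (List Char)) (c r : Char)
    (h : c ∈ d.getD r []) : r ∈ d.keys := by
  by_cases hc : d.contains r = true
  · exact (PySem.Dict.contains_iff_mem_keys d r).mp hc
  · rw [PySem.Dict.getD_of_not_contains d [] (by simpa using hc)] at h
    simp at h

lemma count_of_inv (d : PySem.Dict Char (List Char)) (s : PySem.Set Char × PySem.Set Char × PySem.Set Char)
    (h : pvInv d s) :
    ((d.items.filter (fun p => p.2.contains 'R' && p.2.contains 'G' && p.2.contains 'B')).length : Int)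
      = PySem.Set.len (PySem.Set.inter (PySem.Set.inter s.1 s.2.1) s.2.2) := by
  obtain ⟨hk, h1, h2, h3, hR, hG, hB⟩ := h
  rw [PySem.Dict.items_eq_map_keys d hk [], List.filter_map, List.length_map]
  unfold PySem.Set.len
  congr 1
  apply List.Perm.length_eq
  apply List.perm_of_nodup_nodup_toFinset_eq
  · exact hk.filter _
  · simp only [PySem.Set.inter]
    exact (h1.filter _).filter _
  · ext r
    simp only [List.mem_toFinset, List.mem_filter, Function.comp, PySem.Set.mem_inter]
    constructor
    · rintro ⟨_, hp⟩
      simp only [Bool.and_eq_true, List.contains_iff_mem] at hp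
      exact ⟨⟨(hR r).mpr hp.1.1, (hG r).mpr hp.1.2⟩, (hB r).mpr hp.2⟩
    · rintro ⟨⟨hr, hg⟩, hb⟩
      refine ⟨mem_getD_mem_keys d 'R' r ((hR r).mp hr), ?_⟩
      simp only [Bool.and_eq_true, List.contains_iff_mem]
      exact ⟨⟨(hR r).mp hr, (hG r).mp hg⟩, (hB r).mp hb⟩

lemma inv_empty : pvInv PySem.Dict.empty (PySem.Set.empty, PySem.Set.empty, PySem.Set.empty) := by
  refine ⟨PySem.Dict.nodup_keys_empty, List.nodup_nil, List.nodup_nil, List.nodup_nil, ?_, ?_, ?_⟩ <;>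
    intro r <;> simp [PySem.Dict.getD_empty, PySem.Set.empty]

-- ===== VERDICT (by name: the statement is the Claim_ definition above) =====
theorem loop_spec : Claim_equal_loop := by
  intro rings _
  unfold Spec_loop loop loop_alt
  simp only [List.foldl_map]
  exact count_of_inv _ _ (inv_fold (pvPairs rings) _ _ inv_empty)
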